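-- pv_equiv track=rewrite | github.com/k-paluch/SAT-solver | solver/functions.py | heur1
-- ===== SOURCE A (Python) =====
-- def heur1(literals, clauses):
-- 	tmp = {}
-- 	for literal in literals:
-- 		i =0
-- 		for clause in clauses:
-- 			if literal in clause or -literal in clause:
-- 				i+=1
-- 		if(i!=0):
-- 			tmp.update({literal: i})
--
-- 	tmp = sorted(tmp.items(), key=lambda kv: kv[1])
-- 	result =[]
--
-- 	for t in tmp:
-- 		result.append(t[0])
--
-- 	return result
-- ===== SOURCE B (Python) =====
-- def heur1(literals, clauses):
--     # One pass over clauses builds per-variable occurrence counts, then O(1) lookups.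
--     occ = {}
--     for clause in clauses:
--         for v in dict.fromkeys(abs(x) for x in clause):
--             occ[v] = occ.get(v, 0) + 1
--     tmp = {}
--     for literal in literals:
--         c = occ.get(abs(literal), 0)
--         if c:
--             tmp[literal] = c
--     return [kv[0] for kv in sorted(tmp.items(), key=lambda kv: kv[1])]
-- ===== Notes on version B (the rewrite author's own statement) =====
-- stated objective: faster
-- what changed: Instead of scanning all clauses once per literal, B builds per-variable occurrence counts in a single pass over the clauses and then sorts the literals by an O(1) lookup.
import Mathlib
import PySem

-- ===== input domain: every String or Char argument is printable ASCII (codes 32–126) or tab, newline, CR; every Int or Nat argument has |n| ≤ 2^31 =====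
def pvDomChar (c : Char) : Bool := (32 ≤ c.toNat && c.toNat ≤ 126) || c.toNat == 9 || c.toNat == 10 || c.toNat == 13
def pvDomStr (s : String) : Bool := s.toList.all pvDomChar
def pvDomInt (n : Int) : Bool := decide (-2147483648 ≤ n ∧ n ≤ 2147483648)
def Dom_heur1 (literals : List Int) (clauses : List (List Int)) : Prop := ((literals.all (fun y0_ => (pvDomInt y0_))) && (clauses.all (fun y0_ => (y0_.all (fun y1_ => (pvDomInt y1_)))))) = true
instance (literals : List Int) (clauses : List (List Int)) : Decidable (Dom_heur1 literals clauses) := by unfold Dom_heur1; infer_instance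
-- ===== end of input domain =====

-- ===== PORT A =====
-- A: for each literal, count the clauses containing it or its negation; keep the
-- nonzero counts in a dict and return the keys sorted by count (stable).
def heur1 (literals : List Int) (clauses : List (List Int)) : List Int :=
  let tmp : PySem.Dict Int Int := literals.foldl (fun tmp literal =>
      let i : Int := clauses.foldl (fun i clause =>
          if literal ∈ clause ∨ -literal ∈ clause then i + 1 else i) 0
      if i ≠ 0 then tmp.insert literal i else tmp) PySem.Dict.empty
  let tmp2 := PySem.List.sorted tmp.items (fun kv => kv.2) false
  tmp2.foldl (fun result t => result ++ [t.1]) []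

-- ===== PORT B =====
-- B (faster in a timing run): one pass over the clauses builds per-variable
-- occurrence counts, then each literal's count is a single lookup.
def heur1_alt (literals : List Int) (clauses : List (List Int)) : List Int :=
  let occ : PySem.Dict Int Int := clauses.foldl (fun occ clause =>
      (PySem.List.dedup (clause.map (fun x => |x|))).foldl
        (fun occ v => occ.insert v (occ.getD v 0 + 1)) occ) PySem.Dict.empty
  let tmp : PySem.Dict Int Int := literals.foldl (fun tmp literal =>
      let c := occ.getD |literal| 0
      if c ≠ 0 then tmp.insert literal c else tmp) PySem.Dict.empty
  (PySem.List.sorted tmp.items (fun kv => kv.2) false).map (fun kv => kv.1)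

-- ===== PRECONDITION & SPEC =====
def Spec_heur1 (literals : List Int) (clauses : List (List Int)) (out : List Int) : Prop := out = heur1_alt literals clauses
instance (literals : List Int) (clauses : List (List Int)) (out : List Int) : Decidable (Spec_heur1 literals clauses out) := by unfold Spec_heur1; infer_instance

-- ===== CLAIM (what is proved, stated in full; the proofs are below) =====
def Claim_equal_heur1 : Prop := ∀ (literals : List Int) (clauses : List (List Int)), Dom_heur1 literals clauses → Spec_heur1 literals clauses (heur1 literals clauses)

-- ===== LEMMAS AND PROOFS =====

-- B's occurrence counter characterised: looking up v gives the number of clauses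
-- whose set of absolute values contains v.
theorem occ_getD (clauses : List (List Int)) (d : PySem.Dict Int Int) (v : Int) :
    (clauses.foldl (fun occ clause =>
        (PySem.List.dedup (clause.map (fun x => |x|))).foldl
          (fun occ v => occ.insert v (occ.getD v 0 + 1)) occ) d).getD v 0
      = d.getD v 0 + (clauses.countP (fun clause => decide (v ∈ clause.map (fun x => |x|))) : Int) := by
  induction clauses generalizing d with
  | nil => simp
  | cons cl rest ih =>
    simp only [List.foldl_cons, List.countP_cons]
    rw [ih, PySem.Dict.getD_foldl_insert_add_one]
    have hcnt : (PySem.List.dedup (cl.map (fun x => |x|))).count v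
        = (if v ∈ cl.map (fun x => |x|) then 1 else 0) := by
      by_cases h : v ∈ cl.map (fun x => |x|)
      · rw [if_pos h, List.count_eq_one_of_mem (PySem.List.nodup_dedup _)]
        rwa [PySem.List.mem_dedup]
      · rw [if_neg h, List.count_eq_zero_of_not_mem]
        rwa [PySem.List.mem_dedup]
    rw [hcnt]
    by_cases h : v ∈ cl.map (fun x => |x|) <;> simp [h] <;> omega

-- the two per-literal counts coincide
theorem counts_eq (literal : Int) (clauses : List (List Int)) :
    (clauses.foldl (fun i clause =>
        if literal ∈ clause ∨ -literal ∈ clause then i + 1 else i) (0 : Int))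
      = (clauses.foldl (fun occ clause =>
          (PySem.List.dedup (clause.map (fun x => |x|))).foldl
            (fun occ v => occ.insert v (occ.getD v 0 + 1)) occ) PySem.Dict.empty).getD |literal| 0 := by
  rw [occ_getD, PySem.List.foldl_ite_add_one]
  have : ∀ clause : List Int,
      (literal ∈ clause ∨ -literal ∈ clause) ↔ |literal| ∈ clause.map (fun x => |x|) := by
    intro clause
    simp only [List.mem_map]
    constructor
    · rintro (h | h)
      · exact ⟨literal, h, rfl⟩
      · exact ⟨-literal, h, abs_neg literal⟩
    · rintro ⟨x, hx, habs⟩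
      rcases abs_eq_abs.mp habs with h | h
      · exact Or.inl (h ▸ hx)
      · exact Or.inr (h ▸ hx)
  have hc : clauses.countP (fun clause => decide (literal ∈ clause ∨ -literal ∈ clause))
      = clauses.countP (fun clause => decide (|literal| ∈ clause.map (fun x => |x|))) :=
    List.countP_congr (fun cl _ => by simp [this cl])
  simp only [PySem.Dict.getD_empty, zero_add, hc]

-- ===== VERDICT (by name: the statement is the Claim_ definition above) =====
theorem heur1_spec : Claim_equal_heur1 := by
  intro literals clauses _
  unfold Spec_heur1 heur1 heur1_alt
  rw [PySem.List.foldl_append_singleton_eq_map, List.nil_append]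
  have htmp := PySem.List.foldl_congr_mem (l := literals)
    (f := fun (tmp : PySem.Dict Int Int) literal =>
      let i : Int := clauses.foldl (fun i clause =>
          if literal ∈ clause ∨ -literal ∈ clause then i + 1 else i) 0
      if i ≠ 0 then tmp.insert literal i else tmp)
    (g := fun (tmp : PySem.Dict Int Int) literal =>
      let c := (clauses.foldl (fun occ clause =>
          (PySem.List.dedup (clause.map (fun x => |x|))).foldl
            (fun occ v => occ.insert v (occ.getD v 0 + 1)) occ) PySem.Dict.empty).getD |literal| 0
      if c ≠ 0 then tmp.insert literal c else tmp)
    (init := PySem.Dict.empty)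
    (fun acc lit _ => by simp only [counts_eq lit clauses])
  rw [htmp]
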